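-- pv_equiv track=rewrite | github.com/csw180/coding_py | pg121683.py | solution
-- ===== SOURCE A (Python) =====
-- from collections import Counter
--
-- def solution(input_string):
--     answer = ''
--     zip_str = ''
--     pre_str = ''
--     for c in input_string :
--         if  pre_str and pre_str == c :
--             continue
--         else :
--             pre_str = c
--             zip_str += c
--
--     countor = Counter(zip_str)
--     for k, v in sorted(countor.items()) :
--         if  v > 1 :
--             answer += k
--
--     return answer if answer  else 'N'
-- ===== SOURCE B (Python) =====
-- def solution(input_string):
--     answer = ''
--     for ch in sorted(set(input_string)):
--         runs = 0
--         prev = ''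
--         for c in input_string:
--             if c == ch and prev != ch:
--                 runs += 1
--             prev = c
--         if runs > 1:
--             answer += ch
--     return answer if answer else 'N'
-- ===== Notes on version B (the rewrite author's own statement) =====
-- stated objective: alternative
-- what changed: B drops A's intermediate collapsed string and Counter: it iterates over the sorted distinct characters of the input and, for each candidate, re-scans the input counting that character's run starts (positions where it appears with a different predecessor), appending it when the count exceeds 1.
import Mathlib
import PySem

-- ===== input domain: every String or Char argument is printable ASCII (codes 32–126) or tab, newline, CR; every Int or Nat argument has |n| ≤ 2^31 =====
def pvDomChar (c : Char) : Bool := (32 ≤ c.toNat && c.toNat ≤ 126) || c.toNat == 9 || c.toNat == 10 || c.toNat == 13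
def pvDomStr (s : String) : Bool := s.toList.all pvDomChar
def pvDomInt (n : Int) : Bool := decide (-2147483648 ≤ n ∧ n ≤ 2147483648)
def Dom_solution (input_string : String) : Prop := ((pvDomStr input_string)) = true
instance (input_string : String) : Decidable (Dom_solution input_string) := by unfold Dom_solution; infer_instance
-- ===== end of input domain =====

-- B replaces A's collapse-then-Counter pipeline by a per-character scan: for each
-- sorted distinct character it re-scans the input counting that character's run
-- starts (objective: alternative — no intermediate string, no counter dict).

-- ===== PORT A =====
-- pre_str/zip_str kept as lists of chars (a 1-char Python string ↔ a 1-element list; '' ↔ []).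
def solution (input_string : String) : String :=
  let st := input_string.toList.foldl
    (fun (st : List Char × List Char) c =>
      if st.1 ≠ [] ∧ st.1 = [c] then st else ([c], st.2 ++ [c]))
    ([], [])
  let countor := PySem.Dict.counter st.2
  let answer := (PySem.List.sorted2 countor.items (·.1) (·.2) false).foldl
    (fun acc kv => if kv.2 > 1 then acc ++ [kv.1] else acc) ([] : List Char)
  if answer = [] then "N" else String.ofList answer

-- ===== PORT B =====
-- runs/prev carried as a pair; prev, a Python string, is a list of chars ('' ↔ []).
def solution_alt (input_string : String) : String :=
  let answer := (PySem.List.sorted (PySem.Set.ofList input_string.toList) (fun x => x) false).foldl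
    (fun (answer : List Char) ch =>
      let st := input_string.toList.foldl
        (fun (st : Int × List Char) c =>
          (if c = ch ∧ st.2 ≠ [ch] then st.1 + 1 else st.1, [c]))
        (0, ([] : List Char))
      if st.1 > 1 then answer ++ [ch] else answer)
    []
  if answer = [] then "N" else String.ofList answer

-- ===== PRECONDITION & SPEC =====
def Spec_solution (input_string : String) (out : String) : Prop := out = solution_alt input_string
instance (input_string : String) (out : String) : Decidable (Spec_solution input_string out) := by unfold Spec_solution; infer_instance

-- ===== CLAIM (what is proved, stated in full; the proofs are below) =====
def Claim_equal_solution : Prop := ∀ (input_string : String), Dom_solution input_string → Spec_solution input_string (solution input_string)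

-- ===== LEMMAS AND PROOFS =====

/-- The run-start characters of `l`, given the previous character `p`. -/
def pvCollapse : Option Char → List Char → List Char
  | _, [] => []
  | p, c :: t => if p = some c then pvCollapse p t else c :: pvCollapse (some c) t

/-- The previous-character state after scanning `l`. -/
def pvLast : Option Char → List Char → Option Char
  | p, [] => p
  | _, c :: t => pvLast (some c) t

def pvOpt2List : Option Char → List Char
  | none => []
  | some c => [c]

/-- Number of runs of `ch` in `l` given previous char `p` (B's inner loop, recursively). -/
def pvRunCount (p : Option Char) (l : List Char) (ch : Char) : Int :=
  match l with
  | [] => 0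
  | c :: t => (if c = ch ∧ p ≠ some ch then 1 else 0) + pvRunCount (some c) t ch

theorem pvLoopA (l : List Char) (p : Option Char) (zip : List Char) :
    l.foldl (fun (st : List Char × List Char) c =>
        if st.1 ≠ [] ∧ st.1 = [c] then st else ([c], st.2 ++ [c]))
      (pvOpt2List p, zip)
    = (pvOpt2List (pvLast p l), zip ++ pvCollapse p l) := by
  induction l generalizing p zip with
  | nil => simp [pvCollapse, pvLast]
  | cons c t ih =>
    rw [List.foldl_cons]
    by_cases h : p = some c
    · subst h
      rw [if_pos (by simp [pvOpt2List])]
      rw [show ((pvOpt2List (some c), zip) : List Char × List Char)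
            = (pvOpt2List (some c), zip) from rfl, ih (some c) zip]
      simp [pvCollapse, pvLast]
    · have h1 : ¬ (((pvOpt2List p, zip) : List Char × List Char).1 ≠ [] ∧
          ((pvOpt2List p, zip) : List Char × List Char).1 = [c]) := by
        cases p with
        | none => simp [pvOpt2List]
        | some d =>
          simp only [pvOpt2List]
          intro hc
          exact h (by rw [show d = c by simpa using hc.2])
      rw [if_neg h1]
      rw [show (([c], zip ++ [c]) : List Char × List Char)
            = (pvOpt2List (some c), zip ++ [c]) from rfl, ih (some c) (zip ++ [c])]
      simp [pvCollapse, pvLast, h]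

theorem pvOpt2List_eq_singleton (p : Option Char) (ch : Char) :
    pvOpt2List p = [ch] ↔ p = some ch := by
  cases p <;> simp [pvOpt2List]

/-- B's inner loop computes the run count. -/
theorem pvLoopB (ch : Char) (l : List Char) (p : Option Char) (n : Int) :
    l.foldl (fun (st : Int × List Char) c =>
        (if c = ch ∧ st.2 ≠ [ch] then st.1 + 1 else st.1, [c]))
      (n, pvOpt2List p)
    = (n + pvRunCount p l ch, pvOpt2List (pvLast p l)) := by
  induction l generalizing p n with
  | nil => simp [pvRunCount, pvLast]
  | cons c t ih =>
    rw [List.foldl_cons]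
    have hcnd : (c = ch ∧ pvOpt2List p ≠ [ch]) ↔ (c = ch ∧ p ≠ some ch) := by
      simp [pvOpt2List_eq_singleton]
    by_cases h : c = ch ∧ p ≠ some ch
    · rw [if_pos (hcnd.mpr h)]
      rw [show ((n + 1, [c]) : Int × List Char) = (n + 1, pvOpt2List (some c)) from rfl,
        ih (some c) (n + 1)]
      simp [pvRunCount, pvLast, h, add_assoc]
    · rw [if_neg (fun hc => h (hcnd.mp hc))]
      rw [show ((n, [c]) : Int × List Char) = (n, pvOpt2List (some c)) from rfl, ih (some c) n]
      simp [pvRunCount, pvLast, h]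

/-- The run count is the multiplicity in the collapsed list. -/
theorem pvRunCount_eq_count (l : List Char) (p : Option Char) (ch : Char) :
    pvRunCount p l ch = ((pvCollapse p l).count ch : Int) := by
  induction l generalizing p with
  | nil => simp [pvRunCount, pvCollapse]
  | cons c t ih =>
    by_cases h : p = some c
    · subst h
      have hne : ¬ (c = ch ∧ some c ≠ some ch) := by
        rintro ⟨rfl, hc⟩; exact hc rfl
      simp [pvRunCount, pvCollapse, hne, ih]
    · by_cases hc : c = ch
      · subst hc
        have : p ≠ some c := h
        simp [pvRunCount, pvCollapse, h, this, ih, List.count_cons, add_comm]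
      · simp [pvRunCount, pvCollapse, h, hc, ih, List.count_cons, Ne.symm hc]

/-- Membership survives collapsing (as long as `x` is not the hanging previous char). -/
theorem pvMemCollapse (l : List Char) (p : Option Char) (x : Char) (hp : p ≠ some x) :
    x ∈ pvCollapse p l ↔ x ∈ l := by
  induction l generalizing p with
  | nil => simp [pvCollapse]
  | cons c t ih =>
    by_cases h : p = some c
    · subst h
      have hcx : c ≠ x := fun hcx => hp (by rw [hcx])
      simp [pvCollapse, ih _ hp, hcx, Ne.symm hcx]
    · by_cases hcx : x = c
      · subst hcx
        simp [pvCollapse, h]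
      · simp [pvCollapse, h, hcx, ih (some c) (by simpa using Ne.symm hcx)]

/-- `sorted2` on pairs is `sorted` with the lexicographic key. -/
theorem pvSorted2Pairs (xs : List (Char × Int)) :
    PySem.List.sorted2 xs (·.1) (·.2) false
      = PySem.List.sorted xs (fun p => toLex p) false := by
  rw [PySem.List.sorted_eq_foldl_insertBy]
  unfold PySem.List.sorted2
  simp only [if_pos rfl, if_neg (Bool.false_ne_true)]
  congr 1
  funext acc x
  congr 1
  funext a b
  rcases lt_trichotomy a.1 b.1 with h | h | h
  · simp [h, Prod.Lex.toLex_lt_toLex]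
  · simp [h, Prod.Lex.toLex_lt_toLex]
  · simp [h, not_lt_of_gt h, Prod.Lex.toLex_lt_toLex, ne_of_gt h]

theorem solution_eq_alt (s : String) : solution s = solution_alt s := by
  unfold solution solution_alt
  have hA : s.toList.foldl (fun (st : List Char × List Char) c =>
        if st.1 ≠ [] ∧ st.1 = [c] then st else ([c], st.2 ++ [c])) ([], [])
      = (pvOpt2List (pvLast none s.toList), pvCollapse none s.toList) := by
    simpa [pvOpt2List] using pvLoopA s.toList none []
  set Z : List Char := pvCollapse none s.toList with hZ
  set keys : List Char :=
    PySem.List.sorted (PySem.Set.ofList Z) (fun x => x) false with hkeys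
  -- (1) A's sorted counter items are the pairs over the sorted distinct chars of Z
  have hperm : (List.map (fun k => (k, (Z.count k : Int))) keys).Perm
      (PySem.Dict.counter Z).items := by
    rw [PySem.Dict.items_counter]
    exact (PySem.List.sorted_perm (PySem.Set.ofList Z) (fun x => x) false).map _
  have hpair : List.Pairwise (fun a b : Char × Int => toLex a < toLex b)
      (List.map (fun k => (k, (Z.count k : Int))) keys) := by
    refine List.pairwise_map.mpr ?_
    refine (PySem.List.sorted_ofList_pairwise_lt Z).imp ?_
    intro a b hab
    exact (Prod.Lex.toLex_lt_toLex).mpr (by simp [hab])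
  have hsorted : PySem.List.sorted2 (PySem.Dict.counter Z).items (·.1) (·.2) false
      = List.map (fun k => (k, (Z.count k : Int))) keys := by
    rw [pvSorted2Pairs]
    exact PySem.List.sorted_eq_of_perm_of_pairwise_lt _ _ _ hperm hpair
  -- (2) B's sorted distinct chars of s are the same list `keys`
  have hsame : PySem.List.sorted (PySem.Set.ofList s.toList) (fun x => x) false = keys := by
    rw [hkeys]
    refine PySem.List.sorted_eq_sorted_of_perm _ _ _ (fun a b h => h) ?_
    refine (List.perm_ext_iff_of_nodup (PySem.Set.nodup_ofList _)
      (PySem.Set.nodup_ofList _)).mpr ?_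
    intro a
    rw [PySem.Set.mem_ofList, PySem.Set.mem_ofList, hZ,
      pvMemCollapse s.toList none a (by simp)]
  -- (3) rewrite both answer lists to the same filter
  have hBbody : ∀ (acc : List Char) (ch : Char),
      (let st := s.toList.foldl
          (fun (st : Int × List Char) c =>
            (if c = ch ∧ st.2 ≠ [ch] then st.1 + 1 else st.1, [c]))
          (0, ([] : List Char))
       if st.1 > 1 then acc ++ [ch] else acc)
      = if (Z.count ch : Int) > 1 then acc ++ [ch] else acc := by
    intro acc ch
    have := pvLoopB ch s.toList none 0
    simp only [pvOpt2List] at this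
    rw [this]
    simp [pvRunCount_eq_count, hZ]
  simp only [hA, hsorted, hsame]
  rw [show (fun (answer : List Char) ch =>
        (let st := s.toList.foldl
            (fun (st : Int × List Char) c =>
              (if c = ch ∧ st.2 ≠ [ch] then st.1 + 1 else st.1, [c]))
            (0, ([] : List Char))
         if st.1 > 1 then answer ++ [ch] else answer))
      = (fun (answer : List Char) ch =>
          if (Z.count ch : Int) > 1 then answer ++ [ch] else answer) from
    funext fun acc => funext fun ch => hBbody acc ch]
  rw [PySem.List.foldl_append_ite (p := fun kv : Char × Int => kv.2 > 1) (f := Prod.fst),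
    PySem.List.foldl_append_ite_eq_filter (p := fun ch : Char => (Z.count ch : Int) > 1)]
  have hf : ((fun x : Char × Int => decide (x.2 > 1)) ∘ fun k => (k, (Z.count k : Int)))
      = fun k => decide ((Z.count k : Int) > 1) := by
    funext k; simp [Function.comp]
  simp [List.filter_map, hf, Function.comp_def]

-- ===== VERDICT (by name: the statement is the Claim_ definition above) =====
theorem solution_spec : Claim_equal_solution := by
  intro s _
  exact solution_eq_alt s
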